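-- pv_equiv track=rewrite | github.com/jonathan9-9/interview-practice-problems | Python/algorithms.py | find_lists_with_minimum_value
-- ===== SOURCE A (Python) =====
-- def find_lists_with_minimum_value(lists):
--     list_of_indexes = []
--     min_value = float("inf")
--     for idx, lst in enumerate(lists):
--         current_minimum = min(lst)
--         if current_minimum < min_value:
--             min_value = current_minimum
--             list_of_indexes = [idx]
--         elif current_minimum == min_value:
--             list_of_indexes.append(idx)
--     return list_of_indexes
-- ===== SOURCE B (Python) =====
-- def find_lists_with_minimum_value(lists):
--     mins = [min(lst) for lst in lists]
--     if not mins: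
--         return []
--     m = min(mins)
--     return [i for i, v in enumerate(mins) if v == m]
-- ===== Notes on version B (the rewrite author's own statement) =====
-- stated objective: simpler
-- what changed: Replaces A's fused single pass with its float('inf') sentinel and <-vs-== rebuild/append branching by a minimum table: build per-list minimums, take their global minimum, then collect matching indices with a comprehension.
import Mathlib
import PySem

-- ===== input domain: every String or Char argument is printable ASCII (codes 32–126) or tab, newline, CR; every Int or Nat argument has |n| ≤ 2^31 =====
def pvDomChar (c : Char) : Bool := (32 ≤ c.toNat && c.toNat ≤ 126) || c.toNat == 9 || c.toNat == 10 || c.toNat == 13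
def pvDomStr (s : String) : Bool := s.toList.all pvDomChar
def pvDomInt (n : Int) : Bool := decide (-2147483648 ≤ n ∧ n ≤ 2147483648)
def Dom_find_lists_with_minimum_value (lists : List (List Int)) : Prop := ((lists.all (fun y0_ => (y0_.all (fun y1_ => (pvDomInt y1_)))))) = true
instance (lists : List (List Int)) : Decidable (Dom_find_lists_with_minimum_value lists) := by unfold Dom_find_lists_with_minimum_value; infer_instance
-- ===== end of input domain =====

-- B replaces A's fused scan (inf sentinel, rebuild-on-< / append-on-==) by a per-list
-- minimum table, a global minimum over it, and an index-collecting comprehension (simpler).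

-- Python's min(lst) for a nonempty list of ints; [] is unreachable under Pre_ (min([]) raises).
def pyListMin (l : List Int) : Int :=
  match l with
  | [] => 0
  | h :: t => t.foldl min h

-- ===== PORT A =====
-- the loop body's branch on (idx, current_minimum); min_value = none plays float("inf")
def stepA (st : List Int × Option Int) (p : Int × Int) : List Int × Option Int :=
  match st.2 with
  | none => ([p.1], some p.2)          -- current_minimum < inf
  | some mv =>
    if p.2 < mv then ([p.1], some p.2)
    else if p.2 = mv then (st.1 ++ [p.1], some mv)
    else st

def find_lists_with_minimum_value (lists : List (List Int)) : List Int :=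
  ((PySem.List.enumerate lists).foldl
      (fun st p => stepA st (p.1, pyListMin p.2)) ([], none)).1

-- ===== PORT B =====
def find_lists_with_minimum_value_alt (lists : List (List Int)) : List Int :=
  let mins := lists.map pyListMin
  match mins with
  | [] => []
  | h :: t =>
    let m := t.foldl min h
    (PySem.List.enumerate mins).foldl
      (fun acc p => if p.2 = m then acc ++ [p.1] else acc) []

-- ===== PRECONDITION & SPEC =====
-- Pre_ excludes inputs containing an empty inner list, on which Python's min([]) raises ValueError (in both A and B).
def Pre_find_lists_with_minimum_value (lists : List (List Int)) : Prop :=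
  ∀ l ∈ lists, l ≠ []
instance (lists : List (List Int)) : Decidable (Pre_find_lists_with_minimum_value lists) := by unfold Pre_find_lists_with_minimum_value; infer_instance

def pvWitness_find_lists_with_minimum_value : List (List Int) := [[1], [0, 2], [0]]

def Spec_find_lists_with_minimum_value (lists : List (List Int)) (out : List Int) : Prop := out = find_lists_with_minimum_value_alt lists
instance (lists : List (List Int)) (out : List Int) : Decidable (Spec_find_lists_with_minimum_value lists out) := by unfold Spec_find_lists_with_minimum_value; infer_instance

-- ===== CLAIM (what is proved, stated in full; the proofs are below) =====
def Claim_equal_find_lists_with_minimum_value : Prop := ∀ (lists : List (List Int)), Dom_find_lists_with_minimum_value lists → Pre_find_lists_with_minimum_value lists → Spec_find_lists_with_minimum_value lists (find_lists_with_minimum_value lists)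

-- ===== LEMMAS AND PROOFS =====

-- enumerate commutes with mapping over the values
theorem enumerate_map_snd (f : List Int → Int) (lists : List (List Int)) (s : Int) :
    (PySem.List.enumerate lists s).map (fun p => (p.1, f p.2))
      = PySem.List.enumerate (lists.map f) s := by
  induction lists generalizing s with
  | nil => simp [PySem.List.enumerate_nil]
  | cons h t ih => simp [PySem.List.enumerate_cons, ih]

theorem min?_append_singleton (l : List Int) (x mv : Int) (h : l.min? = some mv) :
    (l ++ [x]).min? = some (min mv x) := by
  cases l with
  | nil => simp [List.min?] at h
  | cons a t =>
    simp only [List.min?] at h ⊢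
    simp only [List.cons_append, List.foldl_append] at *
    simp_all

-- invariant of A's fold: state = (indices whose value is the running minimum, running minimum)
theorem stepA_inv (ps : List (Int × Int)) :
    ps.foldl stepA ([], none)
      = ((ps.filter (fun p => some p.2 = (ps.map (·.2)).min?)).map (·.1),
         (ps.map (·.2)).min?) := by
  induction ps using List.reverseRecOn with
  | nil => simp
  | append_singleton qs p ih =>
    rcases hq : (qs.map (·.2)).min? with _ | mv
    · have hqs : qs = [] := by
        cases qs with
        | nil => rfl
        | cons a b => simp [List.min?] at hq
      subst hqs
      simp [stepA, List.min?]
    · have hmem := (List.min?_eq_some_iff (xs := qs.map (·.2))).1 hq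
      obtain ⟨hin, hle⟩ := hmem
      have hnew : ((qs ++ [p]).map (·.2)).min? = some (min mv p.2) := by
        rw [List.map_append]
        exact min?_append_singleton _ _ _ hq
      rw [List.foldl_append, ih, hq, hnew]
      simp only [List.foldl_cons, List.foldl_nil]
      rcases lt_trichotomy p.2 mv with hlt | heq | hgt
      · -- new strict minimum: old indices are all dropped
        have hminv : min mv p.2 = p.2 := by omega
        simp [stepA, hlt, List.filter_append, hminv]
        intro a b hmem heq'
        have : mv ≤ b := hle b (List.mem_map_of_mem hmem)
        omega
      · -- tie: append the new index
        have hminv : min mv p.2 = mv := by omega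
        simp [stepA, heq, List.filter_append]
      · -- larger: state unchanged, new element filtered out
        have hminv : min mv p.2 = mv := by omega
        have hne : ¬ p.2 < mv := by omega
        have hne2 : ¬ p.2 = mv := by omega
        simp [stepA, hne, hne2, List.filter_append, hminv]

-- B's collecting fold is a filter-then-project
theorem altB_fold (ps : List (Int × Int)) (m : Int) :
    ps.foldl (fun acc p => if p.2 = m then acc ++ [p.1] else acc) []
      = (ps.filter (fun p => p.2 = m)).map (·.1) := by
  induction ps using List.reverseRecOn with
  | nil => simp
  | append_singleton qs p ih =>
    by_cases h : p.2 = m <;>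
      simp [List.foldl_append, List.filter_append, ih, h]

-- ===== VERDICT (by name: the statement is the Claim_ definition above) =====
theorem find_lists_with_minimum_value_spec : Claim_equal_find_lists_with_minimum_value := by
  intro lists _ _
  unfold Spec_find_lists_with_minimum_value
  unfold find_lists_with_minimum_value find_lists_with_minimum_value_alt
  rw [show (fun (st : List Int × Option Int) (p : Int × List Int) => stepA st (p.1, pyListMin p.2))
        = (fun st p => stepA st ((fun q : Int × List Int => (q.1, pyListMin q.2)) p)) from rfl,
     ← List.foldl_map, enumerate_map_snd, stepA_inv]
  cases hm : lists.map pyListMin with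
  | nil =>
    have : lists = [] := by
      cases lists with
      | nil => rfl
      | cons a b => simp at hm
    subst this
    simp [PySem.List.enumerate_nil]
  | cons h t =>
    simp only
    rw [altB_fold]
    have hsnd : ((PySem.List.enumerate (h :: t) 0).map (·.2)) = h :: t :=
      PySem.List.map_snd_enumerate _ _
    rw [hsnd]
    have hmin : (h :: t).min? = some (t.foldl min h) := by simp [List.min?]
    rw [hmin]
    congr 1
    apply List.filter_congr
    intro p _
    simp
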